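-- pv_equiv track=rewrite | github.com/LTMullineux/adventofcode | 2024/12/main.py | count_fences
-- ===== SOURCE A (Python) =====
-- import itertools as it
--
-- Fence = tuple[int, int, int, int]
--
-- def count_fences(fences: set[Fence]) -> int:
--     c = 0
--     while fences:
--         x, y, dx, dy = fences.pop()
--         c += 1
--         for d in (1, -1):
--             for i in it.count(d, d):
--                 # handle moving parallel to existing fence either way
--                 fence = (x + i * dy, y + i * dx, dx, dy)
--                 if fence in fences:
--                     fences.remove(fence)
--                 else:
--                     break
--     return c
-- ===== SOURCE B (Python) =====
-- # Counts fence sides as "run starts": a fence starts a side iff its predecessor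
-- # along its line is absent (a degenerate (dx,dy)==(0,0) fence is its own side).
-- # Like A, leaves the argument set empty (A drains it; we clear it).
-- def count_fences(fences):
--     c = sum(1 for (x, y, dx, dy) in fences
--             if (dx, dy) == (0, 0) or (x - dy, y - dx, dx, dy) not in fences)
--     fences.clear()
--     return c
-- ===== Notes on version B (the rewrite author's own statement) =====
-- stated objective: simpler
-- what changed: Replaces A's destructive pop-and-walk drain loop (walking each collinear run in both directions, removing as it goes) by a single pass that counts run starts: a fence is counted iff its predecessor along its line is not in the set (or the fence is degenerate with dx=dy=0); the set is cleared once at the end to match A's draining. Pre_ requires the list encoding of the set to have distinct elements, as the set type convention prescribes.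
import Mathlib
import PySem

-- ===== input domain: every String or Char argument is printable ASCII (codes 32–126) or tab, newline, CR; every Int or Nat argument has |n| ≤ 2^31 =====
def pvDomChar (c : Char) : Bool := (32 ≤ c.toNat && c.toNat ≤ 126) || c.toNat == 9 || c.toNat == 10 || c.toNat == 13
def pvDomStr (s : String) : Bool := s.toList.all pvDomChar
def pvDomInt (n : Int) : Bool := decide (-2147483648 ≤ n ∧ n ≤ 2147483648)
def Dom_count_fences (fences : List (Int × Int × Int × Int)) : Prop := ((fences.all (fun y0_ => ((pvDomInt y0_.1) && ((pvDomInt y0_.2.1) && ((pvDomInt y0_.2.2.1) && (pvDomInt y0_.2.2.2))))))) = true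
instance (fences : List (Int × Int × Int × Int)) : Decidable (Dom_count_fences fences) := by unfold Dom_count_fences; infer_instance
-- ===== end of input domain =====

-- B replaces A's destructive pop-and-walk drain by one pass counting run starts
-- (a fence whose predecessor along its line is absent); equivalence is about the
-- RETURN value (A empties its set argument; Python B clears it likewise).

-- ===== PORT A =====
-- A's inner `for i in it.count(d, d)` loop (one direction d): remove consecutive
-- collinear fences from the set while present, stop at the first gap.
def stripA (x y dx dy d i : Int) (s : List (Int × Int × Int × Int)) : List (Int × Int × Int × Int) :=
  if h : (x + i * dy, y + i * dx, dx, dy) ∈ s then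
    stripA x y dx dy d (i + d) (s.erase (x + i * dy, y + i * dx, dx, dy))
  else s
termination_by s.length
decreasing_by
  have h1 := List.length_erase_of_mem h
  have h2 := List.length_pos_of_mem h
  omega

-- needed by count_fences' termination proof
theorem stripA_sublist (x y dx dy d i : Int) (s : List (Int × Int × Int × Int)) :
    List.Sublist (stripA x y dx dy d i s) s := by
  fun_induction stripA with
  | case1 i s h ih => exact ih.trans List.erase_sublist
  | case2 i s h => exact List.Sublist.refl _

-- A's `while fences:` drain loop; the popped element is the list head, `c` is the 1 + … accumulator.
def count_fences (fences : List (Int × Int × Int × Int)) : Int :=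
  match fences with
  | [] => 0
  | (x, y, dx, dy) :: rest =>
      1 + count_fences (stripA x y dx dy (-1) (-1) (stripA x y dx dy 1 1 rest))
termination_by fences.length
decreasing_by
  have h1 := (stripA_sublist x y dx dy 1 1 rest).length_le
  have h2 := (stripA_sublist x y dx dy (-1) (-1) (stripA x y dx dy 1 1 rest)).length_le
  simp only [List.length_cons]
  omega

-- ===== PORT B =====
def count_fences_alt (fences : List (Int × Int × Int × Int)) : Int :=
  ((fences.countP (fun f => match f with
    | (x, y, dx, dy) => decide ((dx = 0 ∧ dy = 0) ∨ (x - dy, y - dx, dx, dy) ∉ fences)) : ℕ) : Int)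

-- ===== PRECONDITION & SPEC =====
-- The list encodes a Python set (the type convention: distinct elements); on lists
-- with duplicates neither program computes anything a Python caller could see.
def Pre_count_fences (fences : List (Int × Int × Int × Int)) : Prop := fences.Nodup
instance (fences : List (Int × Int × Int × Int)) : Decidable (Pre_count_fences fences) := by unfold Pre_count_fences; infer_instance
def pvWitness_count_fences : (List (Int × Int × Int × Int)) := [(0, 0, 0, 1), (0, 1, 0, 1), (5, 5, 1, 0), (7, 5, 1, 0)]
def Spec_count_fences (fences : List (Int × Int × Int × Int)) (out : Int) : Prop := out = count_fences_alt fences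
instance (fences : List (Int × Int × Int × Int)) (out : Int) : Decidable (Spec_count_fences fences out) := by unfold Spec_count_fences; infer_instance

-- ===== CLAIM (what is proved, stated in full; the proofs are below) =====
def Claim_equal_count_fences : Prop := ∀ (fences : List (Int × Int × Int × Int)), Dom_count_fences fences → Pre_count_fences fences → Spec_count_fences fences (count_fences fences)

-- ===== LEMMAS AND PROOFS =====

-- the fence i steps along the line of (x, y, dx, dy)
def pvFn (x y dx dy i : Int) : Int × Int × Int × Int := (x + i * dy, y + i * dx, dx, dy)

-- B's per-fence predicate, relative to the set S
def pvStartB (S : List (Int × Int × Int × Int)) (f : Int × Int × Int × Int) : Bool :=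
  match f with
  | (x, y, dx, dy) => decide ((dx = 0 ∧ dy = 0) ∨ (x - dy, y - dx, dx, dy) ∉ S)

theorem alt_eq (s : List (Int × Int × Int × Int)) :
    count_fences_alt s = ((s.countP (pvStartB s) : ℕ) : Int) := rfl

theorem pvFn_eq_iff (x y dx dy a b : Int) (hv : ¬(dx = 0 ∧ dy = 0)) :
    pvFn x y dx dy a = pvFn x y dx dy b ↔ a = b := by
  simp only [pvFn, Prod.mk.injEq, and_true]
  constructor
  · rintro ⟨h1, h2⟩
    rcases not_and_or.mp hv with h | h
    · have : (a - b) * dx = 0 := by linarith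
      rcases mul_eq_zero.mp this with h' | h' <;> [omega; exact absurd h' h]
    · have : (a - b) * dy = 0 := by linarith
      rcases mul_eq_zero.mp this with h' | h' <;> [omega; exact absurd h' h]
  · rintro rfl; exact ⟨rfl, rfl⟩

theorem strip_mem (x y dx dy d : Int) (hd : d ≠ 0) (hv : ¬(dx = 0 ∧ dy = 0)) :
    ∀ (n : ℕ) (s : List (Int × Int × Int × Int)) (i : Int), s.length ≤ n → s.Nodup →
    ∀ t, (t ∈ stripA x y dx dy d i s ↔
      t ∈ s ∧ ¬ ∃ k : ℕ, t = pvFn x y dx dy (i + d * k) ∧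
        ∀ j : ℕ, j ≤ k → pvFn x y dx dy (i + d * j) ∈ s) := by
  intro n
  induction n with
  | zero =>
    intro s i hlen _ t
    have hs : s = [] := List.eq_nil_of_length_eq_zero (by omega)
    subst hs
    rw [stripA]
    simp
  | succ n ih =>
    intro s i hlen hnd t
    have hfa : ∀ a b : Int, a = b → pvFn x y dx dy a = pvFn x y dx dy b :=
      fun a b h => by rw [h]
    have hne0 : ∀ j : ℕ, pvFn x y dx dy (i + d * ((j : Int) + 1)) ≠ pvFn x y dx dy i := by
      intro j h
      have h' := (pvFn_eq_iff x y dx dy _ _ hv).mp h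
      have : d * ((j : Int) + 1) = 0 := by omega
      rcases mul_eq_zero.mp this with h'' | h''
      · exact hd h''
      · omega
    rw [stripA]
    by_cases h : (x + i * dy, y + i * dx, dx, dy) ∈ s
    · rw [dif_pos h]
      rw [ih (s.erase (x + i * dy, y + i * dx, dx, dy)) (i + d)
        (by have := List.length_erase_of_mem h; omega) (hnd.erase _) t]
      have hA : ((x + i * dy, y + i * dx, dx, dy) : Int × Int × Int × Int) = pvFn x y dx dy i := rfl
      rw [hA] at h ⊢
      constructor
      · rintro ⟨ht, hne⟩
        obtain ⟨htA, hts⟩ := hnd.mem_erase_iff.mp ht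
        refine ⟨hts, ?_⟩
        rintro ⟨k, rfl, hall⟩
        cases k with
        | zero => exact htA (hfa _ _ (by norm_num))
        | succ k =>
          apply hne
          refine ⟨k, hfa _ _ (by push_cast; ring), ?_⟩
          intro j hj
          refine hnd.mem_erase_iff.mpr ⟨?_, ?_⟩
          · exact fun hh => hne0 j ((hfa _ _ (by push_cast; ring)).trans hh)
          · have hm := hall (j + 1) (by omega)
            have e : pvFn x y dx dy (i + d * ((j+1:ℕ):Int)) = pvFn x y dx dy (i + d + d * (j:Int)) :=
              hfa _ _ (by push_cast; ring)
            rw [e] at hm; exact hm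
      · rintro ⟨hts, hne⟩
        have htne : t ≠ pvFn x y dx dy i := by
          rintro rfl
          apply hne
          refine ⟨0, hfa _ _ (by norm_num), ?_⟩
          intro j hj
          have hj0 : j = 0 := by omega
          subst hj0
          exact (hfa _ _ (by norm_num) : pvFn x y dx dy (i + d * ((0:ℕ):Int)) = pvFn x y dx dy i) ▸ h
        refine ⟨hnd.mem_erase_iff.mpr ⟨htne, hts⟩, ?_⟩
        rintro ⟨k, rfl, hall⟩
        apply hne
        refine ⟨k + 1, hfa _ _ (by push_cast; ring), ?_⟩
        intro j hj
        cases j with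
        | zero => exact (hfa _ _ (by norm_num) : pvFn x y dx dy (i + d * ((0:ℕ):Int)) = pvFn x y dx dy i) ▸ h
        | succ j =>
          have hm := (hnd.mem_erase_iff.mp (hall j (by omega))).2
          have e : pvFn x y dx dy (i + d + d * (j:Int)) = pvFn x y dx dy (i + d * ((j+1:ℕ):Int)) :=
            hfa _ _ (by push_cast; ring)
          rw [e] at hm; exact hm
    · rw [dif_neg h]
      have hA : ((x + i * dy, y + i * dx, dx, dy) : Int × Int × Int × Int) = pvFn x y dx dy i := rfl
      rw [hA] at h
      constructor
      · intro ht
        refine ⟨ht, ?_⟩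
        rintro ⟨k, rfl, hall⟩
        exact h ((hfa _ _ (by norm_num) : pvFn x y dx dy (i + d * ((0:ℕ):Int)) = pvFn x y dx dy i) ▸ hall 0 (by omega))
      · exact fun hh => hh.1

-- run characterization of one strip call entered at i = d
theorem strip_run (x y dx dy d : Int) (hd : d ≠ 0) (hv : ¬(dx = 0 ∧ dy = 0))
    (s : List (Int × Int × Int × Int)) (hnd : s.Nodup) (m : ℕ)
    (hmem : ∀ j : ℕ, j < m → pvFn x y dx dy (d * (j + 1)) ∈ s)
    (hout : pvFn x y dx dy (d * (m + 1)) ∉ s) :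
    ∀ t, t ∈ stripA x y dx dy d d s ↔
      t ∈ s ∧ ∀ k : ℕ, k < m → t ≠ pvFn x y dx dy (d * (k + 1)) := by
  have hfa : ∀ a b : Int, a = b → pvFn x y dx dy a = pvFn x y dx dy b := fun a b h => by rw [h]
  intro t
  rw [strip_mem x y dx dy d hd hv s.length s d le_rfl hnd t]
  constructor
  · rintro ⟨hts, hne⟩
    refine ⟨hts, ?_⟩
    intro k hk heq
    apply hne
    refine ⟨k, heq.trans (hfa _ _ (by push_cast; ring)), ?_⟩
    intro j hj
    have hm := hmem j (lt_of_le_of_lt hj hk)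
    have e : pvFn x y dx dy (d * ((j:Int) + 1)) = pvFn x y dx dy (d + d * (j:Int)) :=
      hfa _ _ (by ring)
    rw [e] at hm; exact hm
  · rintro ⟨hts, hgood⟩
    refine ⟨hts, ?_⟩
    rintro ⟨k, heq, hall⟩
    by_cases hk : k < m
    · exact hgood k hk (heq.trans (hfa _ _ (by push_cast; ring)))
    · apply hout
      have hm := hall m (by omega)
      have e : pvFn x y dx dy (d + d * (m:Int)) = pvFn x y dx dy (d * ((m:Int) + 1)) :=
        hfa _ _ (by ring)
      rw [e] at hm; exact hm

theorem exists_gap (x y dx dy d : Int) (hd : d ≠ 0) (hv : ¬(dx = 0 ∧ dy = 0))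
    (s : List (Int × Int × Int × Int)) : ∃ n : ℕ, pvFn x y dx dy (d * (n + 1)) ∉ s := by
  by_contra hc
  push_neg at hc
  have hinj : Function.Injective (fun n : ℕ => pvFn x y dx dy (d * ((n : Int) + 1))) := by
    intro a b h
    have h' := (pvFn_eq_iff x y dx dy _ _ hv).mp h
    have h'' := mul_left_cancel₀ hd h'
    omega
  have hnodL : ((List.range (s.length + 1)).map
      (fun n : ℕ => pvFn x y dx dy (d * ((n : Int) + 1)))).Nodup :=
    List.nodup_range.map hinj
  have hsub : ((List.range (s.length + 1)).map
      (fun n : ℕ => pvFn x y dx dy (d * ((n : Int) + 1)))) ⊆ s := by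
    intro t ht
    simp only [List.mem_map, List.mem_range] at ht
    obtain ⟨k, _, rfl⟩ := ht
    exact hc k
  have hlen := (hnodL.subperm hsub).length_le
  simp only [List.length_map, List.length_range] at hlen
  omega

theorem drain_eq : ∀ (n : ℕ) (s : List (Int × Int × Int × Int)), s.length ≤ n → s.Nodup →
    count_fences s = ((s.countP (pvStartB s) : ℕ) : Int) := by
  intro n
  induction n with
  | zero =>
    intro s hlen _
    have hs : s = [] := List.eq_nil_of_length_eq_zero (by omega)
    subst hs
    simp [count_fences]
  | succ n ih =>
    intro s hlen hnd
    rcases s with _ | ⟨f, rest⟩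
    · simp [count_fences]
    rcases f with ⟨x, y, dx, dy⟩
    have hfr : ((x, y, dx, dy) : Int × Int × Int × Int) ∉ rest := (List.nodup_cons.mp hnd).1
    have hndr : rest.Nodup := (List.nodup_cons.mp hnd).2
    have hlenr : rest.length ≤ n := by
      simp only [List.length_cons] at hlen; omega
    by_cases hv : dx = 0 ∧ dy = 0
    · obtain ⟨rfl, rfl⟩ := hv
      have h1 : stripA x y 0 0 1 1 rest = rest := by
        rw [stripA, dif_neg (by simpa using hfr)]
      have h2 : stripA x y 0 0 (-1) (-1) rest = rest := by
        rw [stripA, dif_neg (by simpa using hfr)]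
      rw [count_fences, h1, h2, ih rest hlenr hndr]
      rw [List.countP_cons]
      have hpf : pvStartB ((x, y, 0, 0) :: rest) (x, y, 0, 0) = true := by simp [pvStartB]
      rw [hpf]
      have hcong : rest.countP (pvStartB ((x, y, 0, 0) :: rest)) = rest.countP (pvStartB rest) := by
        apply List.countP_congr
        intro t ht
        rcases t with ⟨tx, ty, tdx, tdy⟩
        have hkey : ((tx - tdy, ty - tdx, tdx, tdy) : Int × Int × Int × Int) ∈ (x, y, 0, 0) :: rest ↔
            ((tx - tdy, ty - tdx, tdx, tdy) : Int × Int × Int × Int) ∈ rest := by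
          simp only [List.mem_cons]
          constructor
          · rintro (heq | hm)
            · exfalso
              simp only [Prod.mk.injEq] at heq
              obtain ⟨e1, e2, e3, e4⟩ := heq
              subst e3; subst e4
              have hx : tx = x := by omega
              have hy : ty = y := by omega
              rw [hx, hy] at ht
              exact hfr ht
            · exact hm
          · exact fun hm => Or.inr hm
        simp only [pvStartB, decide_eq_true_eq]
        exact or_congr Iff.rfl (not_congr hkey)
      rw [hcong]
      simp
      omega
    · have hfa : ∀ a b : Int, a = b → pvFn x y dx dy a = pvFn x y dx dy b := fun a b h => by rw [h]
      have hfn0 : pvFn x y dx dy 0 = (x, y, dx, dy) := by simp [pvFn]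
      obtain ⟨m₁, hm1mem, hm1out⟩ :
          ∃ m : ℕ, (∀ j : ℕ, j < m → pvFn x y dx dy (1 * ((j : Int) + 1)) ∈ rest) ∧
            pvFn x y dx dy (1 * ((m : Int) + 1)) ∉ rest :=
        ⟨Nat.find (exists_gap x y dx dy 1 one_ne_zero hv rest),
          fun j hj => not_not.mp (Nat.find_min (exists_gap x y dx dy 1 one_ne_zero hv rest) hj),
          Nat.find_spec (exists_gap x y dx dy 1 one_ne_zero hv rest)⟩
      set s1 := stripA x y dx dy 1 1 rest with hs1def
      have hmem_s1 : ∀ t, t ∈ s1 ↔ t ∈ rest ∧ ∀ k : ℕ, k < m₁ → t ≠ pvFn x y dx dy (1 * ((k : Int) + 1)) :=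
        strip_run x y dx dy 1 one_ne_zero hv rest hndr m₁ hm1mem hm1out
      have hnds1 : s1.Nodup := hndr.sublist (stripA_sublist x y dx dy 1 1 rest)
      have hneg_s1 : ∀ j : Int, j < 0 → (pvFn x y dx dy j ∈ s1 ↔ pvFn x y dx dy j ∈ rest) := by
        intro j hj
        rw [hmem_s1 (pvFn x y dx dy j)]
        constructor
        · exact fun h => h.1
        · intro h
          refine ⟨h, ?_⟩
          intro k hk heq
          have := (pvFn_eq_iff x y dx dy _ _ hv).mp heq
          omega
      obtain ⟨m₂, hm2mem', hm2out'⟩ :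
          ∃ m : ℕ, (∀ j : ℕ, j < m → pvFn x y dx dy ((-1) * ((j : Int) + 1)) ∈ s1) ∧
            pvFn x y dx dy ((-1) * ((m : Int) + 1)) ∉ s1 :=
        ⟨Nat.find (exists_gap x y dx dy (-1) (by norm_num) hv s1),
          fun j hj => not_not.mp (Nat.find_min (exists_gap x y dx dy (-1) (by norm_num) hv s1) hj),
          Nat.find_spec (exists_gap x y dx dy (-1) (by norm_num) hv s1)⟩
      have hm2memR : ∀ j : ℕ, j < m₂ → pvFn x y dx dy ((-1) * ((j : Int) + 1)) ∈ rest :=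
        fun j hj => (hneg_s1 _ (by omega)).mp (hm2mem' j hj)
      have hm2outR : pvFn x y dx dy ((-1) * ((m₂ : Int) + 1)) ∉ rest :=
        fun h => hm2out' ((hneg_s1 _ (by omega)).mpr h)
      set s2 := stripA x y dx dy (-1) (-1) s1 with hs2def
      have hmem_s2' : ∀ t, t ∈ s2 ↔ t ∈ s1 ∧ ∀ k : ℕ, k < m₂ → t ≠ pvFn x y dx dy ((-1) * ((k : Int) + 1)) :=
        strip_run x y dx dy (-1) (by norm_num) hv s1 hnds1 m₂ hm2mem' hm2out'
      have hnds2 : s2.Nodup := hnds1.sublist (stripA_sublist x y dx dy (-1) (-1) s1)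
      have hmem_s2 : ∀ t, t ∈ s2 ↔ t ∈ rest ∧
          ∀ i : Int, -(m₂ : Int) ≤ i → i ≤ (m₁ : Int) → t ≠ pvFn x y dx dy i := by
        intro t
        rw [hmem_s2' t, hmem_s1 t]
        constructor
        · rintro ⟨⟨htr, hpos⟩, hneg⟩
          refine ⟨htr, ?_⟩
          intro i h1 h2 heq
          rcases lt_trichotomy i 0 with hi | hi | hi
          · obtain ⟨k, hk1, hk2⟩ : ∃ k : ℕ, i = (-1) * ((k : Int) + 1) ∧ k < m₂ :=
              ⟨(-i - 1).toNat, by omega, by omega⟩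
            exact hneg k hk2 (heq.trans (hfa _ _ hk1))
          · subst hi
            rw [hfn0] at heq
            exact hfr (heq ▸ htr)
          · obtain ⟨k, hk1, hk2⟩ : ∃ k : ℕ, i = 1 * ((k : Int) + 1) ∧ k < m₁ :=
              ⟨(i - 1).toNat, by omega, by omega⟩
            exact hpos k hk2 (heq.trans (hfa _ _ hk1))
        · rintro ⟨htr, hall⟩
          exact ⟨⟨htr, fun k hk => hall (1 * ((k : Int) + 1)) (by omega) (by omega)⟩,
            fun k hk => hall ((-1) * ((k : Int) + 1)) (by omega) (by omega)⟩
      have hmemI_S : ∀ i : Int, -(m₂ : Int) ≤ i → i ≤ (m₁ : Int) →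
          pvFn x y dx dy i ∈ (x, y, dx, dy) :: rest := by
        intro i h1 h2
        rcases lt_trichotomy i 0 with hi | hi | hi
        · refine List.mem_cons_of_mem _ ?_
          obtain ⟨k, hk1, hk2⟩ : ∃ k : ℕ, i = (-1) * ((k : Int) + 1) ∧ k < m₂ :=
            ⟨(-i - 1).toNat, by omega, by omega⟩
          rw [hfa _ _ hk1]
          exact hm2memR k hk2
        · rw [hi, hfn0]
          exact List.mem_cons_self
        · refine List.mem_cons_of_mem _ ?_
          obtain ⟨k, hk1, hk2⟩ : ∃ k : ℕ, i = 1 * ((k : Int) + 1) ∧ k < m₁ :=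
            ⟨(i - 1).toNat, by omega, by omega⟩
          rw [hfa _ _ hk1]
          exact hm1mem k hk2
      set I := (List.range (m₂ + m₁ + 1)).map (fun j : ℕ => pvFn x y dx dy ((j : Int) - (m₂ : Int))) with hIdef
      have hInod : I.Nodup := by
        rw [hIdef]
        refine List.nodup_range.map ?_
        intro a b h
        have := (pvFn_eq_iff x y dx dy _ _ hv).mp h
        omega
      have hImem : ∀ t, t ∈ I ↔ ∃ i : Int, -(m₂ : Int) ≤ i ∧ i ≤ (m₁ : Int) ∧ t = pvFn x y dx dy i := by
        intro t
        rw [hIdef]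
        simp only [List.mem_map, List.mem_range]
        constructor
        · rintro ⟨j, hj, rfl⟩
          exact ⟨(j : Int) - m₂, by omega, by omega, rfl⟩
        · rintro ⟨i, h1, h2, rfl⟩
          exact ⟨(i + m₂).toNat, by omega, (hfa _ _ (by omega)).symm⟩
      have hdisj : ∀ a ∈ s2, ∀ b ∈ I, a ≠ b := by
        intro a ha b hb hab
        subst hab
        obtain ⟨i, h1, h2, rfl⟩ := (hImem _).mp hb
        exact ((hmem_s2 _).mp ha).2 i h1 h2 rfl
      have hperm : List.Perm ((x, y, dx, dy) :: rest) (s2 ++ I) := by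
        rw [List.perm_ext_iff_of_nodup hnd (List.nodup_append.mpr ⟨hnds2, hInod, hdisj⟩)]
        intro t
        rw [List.mem_append, List.mem_cons]
        constructor
        · rintro (rfl | htr)
          · exact Or.inr ((hImem _).mpr ⟨0, by omega, by omega, hfn0.symm⟩)
          · by_cases hg : ∀ i : Int, -(m₂ : Int) ≤ i → i ≤ (m₁ : Int) → t ≠ pvFn x y dx dy i
            · exact Or.inl ((hmem_s2 t).mpr ⟨htr, hg⟩)
            · push_neg at hg
              obtain ⟨i, h1, h2, heq⟩ := hg
              exact Or.inr ((hImem t).mpr ⟨i, h1, h2, heq⟩)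
        · rintro (hts | htI)
          · exact Or.inr ((hmem_s2 t).mp hts).1
          · obtain ⟨i, h1, h2, rfl⟩ := (hImem t).mp htI
            exact List.mem_cons.mp (hmemI_S i h1 h2)
      have hpfn : ∀ i : Int, pvStartB ((x, y, dx, dy) :: rest) (pvFn x y dx dy i)
          = decide (pvFn x y dx dy (i - 1) ∉ (x, y, dx, dy) :: rest) := by
        intro i
        simp only [pvStartB, pvFn]
        rw [decide_eq_decide]
        rw [show ((x + i * dy - dy, y + i * dx - dx, dx, dy) : Int × Int × Int × Int)
            = (x + (i - 1) * dy, y + (i - 1) * dx, dx, dy) from by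
          rw [show x + i * dy - dy = x + (i - 1) * dy from by ring,
            show y + i * dx - dx = y + (i - 1) * dx from by ring]]
        exact or_iff_right hv
      have hIcount : I.countP (pvStartB ((x, y, dx, dy) :: rest)) = 1 := by
        rw [hIdef, List.countP_map]
        rw [List.countP_congr (q := fun j : ℕ => decide (j = 0)) ?_]
        · rw [show m₂ + m₁ + 1 = (m₂ + m₁) + 1 from rfl, List.range_succ_eq_map]
          rw [List.countP_cons, List.countP_map]
          have hz : (List.range (m₂ + m₁)).countP ((fun j : ℕ => decide (j = 0)) ∘ Nat.succ) = 0 := by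
            apply List.countP_eq_zero.mpr
            intro a _
            simp
          rw [hz]
          simp
        · intro j hj
          rw [List.mem_range] at hj
          simp only [Function.comp_apply]
          rw [hpfn]
          rcases Nat.eq_zero_or_pos j with rfl | hjpos
          · have hnot : pvFn x y dx dy (((0 : ℕ) : Int) - (m₂ : Int) - 1) ∉ (x, y, dx, dy) :: rest := by
              intro hmem
              rcases List.mem_cons.mp hmem with heq | hinr
              · have := (pvFn_eq_iff x y dx dy _ _ hv).mp (heq.trans hfn0.symm)
                omega
              · apply hm2outR
                rw [hfa _ _ (show (-1 : Int) * ((m₂ : Int) + 1) = ((0 : ℕ) : Int) - (m₂ : Int) - 1 by omega)]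
                exact hinr
            simp only [decide_eq_true_eq]
            exact iff_of_true hnot trivial
          · have hin : pvFn x y dx dy (((j : ℕ) : Int) - (m₂ : Int) - 1) ∈ (x, y, dx, dy) :: rest :=
              hmemI_S _ (by omega) (by omega)
            simp only [decide_eq_true_eq]
            exact iff_of_false (not_not_intro hin) (by omega)
      have hs2count : s2.countP (pvStartB ((x, y, dx, dy) :: rest)) = s2.countP (pvStartB s2) := by
        apply List.countP_congr
        intro t ht
        obtain ⟨htr, hgood⟩ := (hmem_s2 t).mp ht
        rcases t with ⟨tx, ty, tdx, tdy⟩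
        have hpred : ∀ i : Int, ((tx - tdy, ty - tdx, tdx, tdy) : Int × Int × Int × Int) = pvFn x y dx dy i →
            ((tx, ty, tdx, tdy) : Int × Int × Int × Int) = pvFn x y dx dy (i + 1) := by
          intro i h
          simp only [pvFn, Prod.mk.injEq] at h ⊢
          obtain ⟨e1, e2, e3, e4⟩ := h
          subst e3; subst e4
          exact ⟨by linear_combination e1, by linear_combination e2, rfl, rfl⟩
        have hiff : ((tx - tdy, ty - tdx, tdx, tdy) : Int × Int × Int × Int) ∈ (x, y, dx, dy) :: rest ↔
            ((tx - tdy, ty - tdx, tdx, tdy) : Int × Int × Int × Int) ∈ s2 := by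
          constructor
          · intro hin
            apply (hmem_s2 _).mpr
            rcases List.mem_cons.mp hin with heqf | hinr
            · exfalso
              have ht1 : ((tx, ty, tdx, tdy) : Int × Int × Int × Int) = pvFn x y dx dy 1 := by
                have h01 := hpred 0 (by rw [hfn0]; exact heqf)
                rw [hfa _ _ (show (0 : Int) + 1 = 1 by norm_num)] at h01
                exact h01
              rcases Nat.eq_zero_or_pos m₁ with hm0 | hmpos
              · apply hm1out
                rw [hfa _ _ (show (1 : Int) * ((m₁ : Int) + 1) = 1 by rw [hm0]; norm_num)]
                rw [← ht1]
                exact htr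
              · exact hgood 1 (by omega) (by omega) ht1
            · refine ⟨hinr, ?_⟩
              intro i h1 h2 heq
              have ht' := hpred i heq
              by_cases hle : i + 1 ≤ (m₁ : Int)
              · exact hgood (i + 1) (by omega) hle ht'
              · apply hm1out
                rw [hfa _ _ (show (1 : Int) * ((m₁ : Int) + 1) = i + 1 by omega)]
                rw [← ht']
                exact htr
          · intro hin
            exact List.mem_cons_of_mem _ ((hmem_s2 _).mp hin).1
        simp only [pvStartB, decide_eq_true_eq]
        exact or_congr Iff.rfl (not_congr hiff)
      have hlens1 := (stripA_sublist x y dx dy 1 1 rest).length_le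
      have hlens2 := (stripA_sublist x y dx dy (-1) (-1) s1).length_le
      rw [count_fences]
      rw [← hs1def, ← hs2def]
      rw [ih s2 (by rw [hs1def] at hlens2; rw [hs2def, hs1def]; omega) hnds2]
      rw [hperm.countP_eq, List.countP_append, hIcount, hs2count]
      push_cast
      ring

-- ===== VERDICT (by name: the statement is the Claim_ definition above) =====
theorem count_fences_spec : Claim_equal_count_fences := by
  intro fences _ hpre
  unfold Spec_count_fences
  exact (drain_eq fences.length fences le_rfl hpre).trans (alt_eq fences).symm
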